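-- pv_equiv track=rewrite | github.com/realshivanshsood-dev09/immunoinformatics-pipeline | immunoinformatics_pipeline/src/preprocess.py | segment_sequence
-- ===== SOURCE A (Python) =====
-- def segment_sequence(sequence: str, segment_length: int, overlap: int) -> list[tuple[int, str]]:
--     if len(sequence) <= segment_length:
--         return [(1, sequence)]
--
--     segments: list[tuple[int, str]] = []
--     step = max(1, segment_length - overlap)
--     for start in range(0, len(sequence), step):
--         end = min(start + segment_length, len(sequence))
--         segment = sequence[start:end]
--         if segment:
--             segments.append((start + 1, segment))
--         if end == len(sequence):
--             break
--     return segments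
-- ===== SOURCE B (Python) =====
-- def segment_sequence(sequence: str, segment_length: int, overlap: int) -> list[tuple[int, str]]:
--     n = len(sequence)
--     if n <= segment_length:
--         return [(1, sequence)]
--     step = max(1, segment_length - overlap)
--     done: list[tuple[int, str]] = []
--     open_bufs: list[tuple[int, list[str]]] = []  # windows still being filled
--     for p, ch in enumerate(sequence):
--         # open a new window at each stride point, unless the previous window
--         # already reached the end of the sequence
--         if p % step == 0 and (p == 0 or p - step + segment_length < n):
--             open_bufs.append((p + 1, []))
--         still: list[tuple[int, list[str]]] = []
--         for start, buf in open_bufs: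
--             buf.append(ch)
--             if len(buf) == segment_length:
--                 done.append((start, ''.join(buf)))
--             else:
--                 still.append((start, buf))
--         open_bufs = still
--     done.extend((start, ''.join(buf)) for start, buf in open_bufs)
--     return done
-- ===== Notes on version B (the rewrite author's own statement) =====
-- stated objective: alternative
-- what changed: Replaces A's stride-and-slice loop with break by a streaming single pass over the characters that maintains a list of open windows, appending each character to every window it belongs to and emitting a window when it fills (or at end of string); no slicing and no stride arithmetic over starts.
-- outside the precondition, e.g. on segment_sequence('abc', 0, 0): A returns [], B returns [(1, 'abc'), (2, 'bc'), (3, 'c')]; on segment_sequence('abc', -1, 0): A returns [(1, 'ab')], B returns [(1, 'abc'), (2, 'bc'), (3, 'c')]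
import Mathlib
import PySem

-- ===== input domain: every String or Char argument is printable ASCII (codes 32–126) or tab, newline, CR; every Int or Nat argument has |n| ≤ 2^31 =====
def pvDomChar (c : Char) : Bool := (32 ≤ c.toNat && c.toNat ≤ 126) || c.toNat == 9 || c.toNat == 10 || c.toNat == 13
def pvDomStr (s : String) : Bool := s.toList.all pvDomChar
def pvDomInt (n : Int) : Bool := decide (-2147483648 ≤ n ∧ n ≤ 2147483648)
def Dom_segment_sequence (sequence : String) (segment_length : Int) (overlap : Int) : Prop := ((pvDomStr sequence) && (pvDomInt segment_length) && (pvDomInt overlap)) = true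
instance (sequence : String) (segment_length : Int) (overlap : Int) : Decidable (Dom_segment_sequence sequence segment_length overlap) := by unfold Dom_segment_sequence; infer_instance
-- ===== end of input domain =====

-- B replaces A's stride-and-slice loop with break by a streaming one-pass algorithm: it walks the
-- characters once, distributing each character into the currently open windows (objective: alternative).

-- ===== PORT A =====
-- A's for-loop with break: recursion over the list of starts, carrying the accumulator
def segA_loop (s : List Char) (segment_length : Int) (starts : List Int)
    (segments : List (Int × String)) : List (Int × String) :=
  match starts with
  | [] => segments
  | start :: rest =>
    let e := min (start + segment_length) ((s.length : Int))
    let segment := PySem.List.slice s (some start) (some e)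
    let segments' := if segment ≠ [] then segments ++ [(start + 1, String.ofList segment)] else segments
    if e = ((s.length : Int)) then segments' else segA_loop s segment_length rest segments'

def segment_sequence (sequence : String) (segment_length : Int) (overlap : Int) : List (Int × String) :=
  let s := sequence.toList
  if (s.length : Int) ≤ segment_length then [(1, sequence)]
  else
    let step := max 1 (segment_length - overlap)
    segA_loop s segment_length (PySem.List.pyRange 0 (s.length : Int) step) []

-- ===== PORT B =====
-- inner for-loop of Source B: append ch to each open buffer; completed buffers go to done, others to still
def segB_inner (L : Int) (ch : Char) (acc : List (Int × String) × List (Int × List Char))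
    (sb : Int × List Char) : List (Int × String) × List (Int × List Char) :=
  let buf := sb.2 ++ [ch]
  if ((buf.length : Int) = L) then (acc.1 ++ [(sb.1, String.ofList buf)], acc.2)
  else (acc.1, acc.2 ++ [(sb.1, buf)])

-- body of Source B's outer for-loop: maybe open a window at this stride point, then run the inner loop
def segB_step (n L step : Int) (st : List (Int × String) × List (Int × List Char))
    (pc : Int × Char) : List (Int × String) × List (Int × List Char) :=
  let opens := if PySem.Int.mod pc.1 step = 0 ∧ (pc.1 = 0 ∨ pc.1 - step + L < n)
               then st.2 ++ [(pc.1 + 1, ([] : List Char))] else st.2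
  opens.foldl (segB_inner L pc.2) (st.1, [])

def segment_sequence_alt (sequence : String) (segment_length : Int) (overlap : Int) : List (Int × String) :=
  let s := sequence.toList
  let n : Int := (s.length : Int)
  if n ≤ segment_length then [(1, sequence)]
  else
    let step := max 1 (segment_length - overlap)
    let fin := (PySem.List.enumerate s 0).foldl (segB_step n segment_length step) ([], [])
    fin.1 ++ fin.2.map (fun sb => (sb.1, String.ofList sb.2))

-- ===== PRECONDITION & SPEC =====
-- Pre_ restricts to the natural domain: a positive segment_length (or the short-sequence guard);
-- it excludes nonpositive segment_length on a longer sequence, where A returns [] (length 0) or a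
-- wrap-around fragment of Python's negative slice bound (length < 0) — see the cites in the claim.
def Pre_segment_sequence (sequence : String) (segment_length : Int) (overlap : Int) : Prop :=
  (sequence.toList.length : Int) ≤ segment_length ∨ 1 ≤ segment_length
instance (sequence : String) (segment_length : Int) (overlap : Int) : Decidable (Pre_segment_sequence sequence segment_length overlap) := by unfold Pre_segment_sequence; infer_instance

def pvWitness_segment_sequence : String × Int × Int := ("GATTACA", 3, 1)

def Spec_segment_sequence (sequence : String) (segment_length : Int) (overlap : Int) (out : List (Int × String)) : Prop := out = segment_sequence_alt sequence segment_length overlap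
instance (sequence : String) (segment_length : Int) (overlap : Int) (out : List (Int × String)) : Decidable (Spec_segment_sequence sequence segment_length overlap out) := by unfold Spec_segment_sequence; infer_instance

-- ===== CLAIM (what is proved, stated in full; the proofs are below) =====
def Claim_equal_segment_sequence : Prop := ∀ (sequence : String) (segment_length : Int) (overlap : Int), Dom_segment_sequence sequence segment_length overlap → Pre_segment_sequence sequence segment_length overlap → Spec_segment_sequence sequence segment_length overlap (segment_sequence sequence segment_length overlap)

-- ===== LEMMAS AND PROOFS =====

-- ---- A-side: the break-driven loop computes the closed-form window list ----

lemma pyRange_pos_nil (a b st : Int) (hst : 0 < st) (hba : b ≤ a) :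
    PySem.List.pyRange a b st = [] := by
  rw [PySem.List.pyRange_of_pos a b hst]
  simp [show ¬ a < b by omega]

lemma pyRange_pos_cons (a b st : Int) (hst : 0 < st) (hab : a < b) :
    PySem.List.pyRange a b st = a :: PySem.List.pyRange (a + st) b st := by
  rw [PySem.List.pyRange_of_pos a b hst, PySem.List.pyRange_of_pos (a + st) b hst]
  have hfd : ∀ x : Int, x / st = PySem.Int.floordiv x st := fun x =>
    (PySem.Int.floordiv_eq_ediv_of_pos (a := x) hst).symm
  by_cases h2 : a + st < b
  · have hq' := (PySem.Int.floordiv_eq_iff_of_pos (a := b - a - 1) (b := st)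
      (q := PySem.Int.floordiv (b - a - 1) st) hst).mp rfl
    have hq : PySem.Int.floordiv (b - a + st - 1) st = PySem.Int.floordiv (b - a - 1) st + 1 := by
      rw [PySem.Int.floordiv_eq_iff_of_pos hst]
      constructor <;> nlinarith [hq'.1, hq'.2]
    have hbs : b - (a + st) + st - 1 = b - a - 1 := by ring
    rw [if_pos hab, if_pos h2, hbs, hfd, hfd, hq]
    have h0 : 0 ≤ PySem.Int.floordiv (b - a - 1) st := by
      nlinarith [hq'.2]
    have htn : (PySem.Int.floordiv (b - a - 1) st + 1).toNat
        = (PySem.Int.floordiv (b - a - 1) st).toNat + 1 := by omega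
    rw [htn, List.range_succ_eq_map]
    simp [List.map_map, Function.comp]
    intro j _; ring
  · have hq : PySem.Int.floordiv (b - a + st - 1) st = 1 := by
      rw [PySem.Int.floordiv_eq_iff_of_pos hst]; constructor <;> nlinarith
    rw [if_pos hab, if_neg h2, hfd, hq]
    simp

lemma slice_min_len {α : Type} (xs : List α) (a b : Int) (ha : 0 ≤ a) (hb : 0 ≤ b) :
    PySem.List.slice xs (some a) (some (min b (xs.length : Int))) = PySem.List.slice xs (some a) (some b) := by
  rw [PySem.List.slice_toNat xs ha (by omega), PySem.List.slice_toNat xs ha hb]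
  by_cases h : b ≤ (xs.length : Int)
  · rw [min_eq_left h]
  · rw [min_eq_right (by omega)]
    rw [List.take_of_length_le (by simp only [List.length_drop]; omega), List.take_of_length_le (by simp only [List.length_drop]; omega)]

lemma slice_ne_nil {α : Type} (xs : List α) (a b : Int) (ha : 0 ≤ a) (hab : a < b)
    (hb : b ≤ (xs.length : Int)) : PySem.List.slice xs (some a) (some b) ≠ [] := by
  have hlen := PySem.List.length_slice xs a b
  have hca : PySem.List.clampIdx xs.length a = a.toNat := by
    unfold PySem.List.clampIdx; rw [if_neg (by omega)]; omega
  have hcb : PySem.List.clampIdx xs.length b = b.toNat := by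
    unfold PySem.List.clampIdx; rw [if_neg (by omega)]; omega
  intro hnil
  rw [hnil] at hlen
  simp at hlen
  omega

lemma segA_loop_eq (s : List Char) (L st k last : Int)
    (hL : 1 ≤ L) (hst : 0 < st) (_hn : L < (s.length : Int))
    (hk1 : (k - 1) * st < (s.length : Int) - L) (hk2 : (s.length : Int) - L ≤ k * st)
    (hlast : last = min k (PySem.Int.floordiv ((s.length : Int) - 1) st)) :
    ∀ (m : Nat) (i0 : Int) (acc : List (Int × String)), 0 ≤ i0 → i0 ≤ k → (k - i0).toNat = m →
      segA_loop s L (PySem.List.pyRange (i0 * st) (s.length : Int) st) acc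
        = acc ++ (PySem.List.pyRange i0 (last + 1) 1).map
            (fun i => (i * st + 1,
              String.ofList (PySem.List.slice s (some (i * st)) (some (i * st + L))))) := by
  have hf : ∀ q : Int, q ≤ PySem.Int.floordiv ((s.length : Int) - 1) st ↔ q * st ≤ (s.length : Int) - 1 :=
    fun q => PySem.Int.le_floordiv_iff_mul_le hst
  intro m
  induction m with
  | zero =>
    intro i0 acc h0 hik hm
    have hik' : i0 = k := by omega
    subst hik'
    by_cases hlt : i0 * st < (s.length : Int)
    · -- break step: e = n, one final segment
      rw [pyRange_pos_cons _ _ _ hst hlt]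
      have hmin : min (i0 * st + L) ((s.length : Int)) = (s.length : Int) := by omega
      have hne := slice_ne_nil s (i0 * st) ((s.length : Int))
        (by positivity) hlt le_rfl
      have hlastk : last = i0 := by
        have : i0 ≤ PySem.Int.floordiv ((s.length : Int) - 1) st := (hf _).mpr (by omega)
        omega
      rw [hlastk]
      rw [show PySem.List.pyRange i0 (i0 + 1) 1 = [i0] from PySem.List.pyRange_one_singleton i0]
      have hseg : PySem.List.slice s (some (i0 * st)) (some ((s.length : Int)))
          = PySem.List.slice s (some (i0 * st)) (some (i0 * st + L)) := by
        rw [← slice_min_len s (i0 * st) (i0 * st + L) (by positivity) (by omega), hmin]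
      simp only [segA_loop, hmin]
      rw [if_pos trivial, if_pos hne, hseg]
      simp
    · -- past the end: range empty on both sides
      rw [pyRange_pos_nil _ _ _ hst (by omega),
          PySem.List.pyRange_one_eq_nil (by
            have : PySem.Int.floordiv ((s.length : Int) - 1) st < i0 := by
              by_contra hcon
              rw [not_lt] at hcon
              have := (hf _).mp hcon
              omega
            omega)]
      simp [segA_loop]
  | succ m ih =>
    intro i0 acc h0 hik hm
    have hiklt : i0 < k := by omega
    have hisd : i0 * st < (s.length : Int) - L := by nlinarith
    have hlt : i0 * st < (s.length : Int) := by omega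
    rw [pyRange_pos_cons _ _ _ hst hlt]
    have hmin : min (i0 * st + L) ((s.length : Int)) = i0 * st + L := by omega
    have hne := slice_ne_nil s (i0 * st) (i0 * st + L) (by positivity) (by omega) (by omega)
    have hil : i0 ≤ last := by
      have : i0 ≤ PySem.Int.floordiv ((s.length : Int) - 1) st := (hf _).mpr (by omega)
      omega
    rw [PySem.List.pyRange_one_cons (by omega)]
    simp only [segA_loop, hmin]
    rw [if_neg (by omega : ¬ (i0 * st + L = ((s.length : Int)))), if_pos hne]
    rw [show i0 * st + st = (i0 + 1) * st by ring]
    rw [ih (i0 + 1) (acc ++ [(i0 * st + 1, String.ofList (PySem.List.slice s (some (i0 * st)) (some (i0 * st + L))))]) (by omega) (by omega) (by omega)]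
    simp

-- ---- B-side: the streaming fold maintains done/open windows ----

-- open buffer for window i after p characters: chars s[i*t : p]
def segBuf (s : List Char) (t p i : Nat) : Int × List Char :=
  (((i * t : Nat) : Int) + 1, (s.drop (i * t)).take (p - i * t))

-- finished entry for window i
def segDone (s : List Char) (t l i : Nat) : Int × String :=
  (((i * t : Nat) : Int) + 1, String.ofList ((s.drop (i * t)).take l))

lemma buf_push (s : List Char) (j p : Nat) (hj : j ≤ p) (hp : p < s.length) :
    (s.drop j).take (p - j) ++ [s[p]] = (s.drop j).take (p + 1 - j) := by
  have hm : p + 1 - j = (p - j) + 1 := by omega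
  have hget : (s.drop j)[p - j]? = some s[p] := by
    rw [List.getElem?_drop, show j + (p - j) = p by omega]
    exact List.getElem?_eq_getElem hp
  rw [hm, List.take_add_one, hget]
  rfl

lemma inner_nodone (s : List Char) (t l : Nat) (p : Nat) (hp : p < s.length)
    (lst : List Nat) (d : List (Int × String)) (acc : List (Int × List Char))
    (hlst : ∀ i ∈ lst, i * t ≤ p ∧ p + 1 ≠ i * t + l) :
    (lst.map (segBuf s t p)).foldl (segB_inner (l : Int) s[p]) (d, acc)
      = (d, acc ++ lst.map (segBuf s t (p + 1))) := by
  induction lst generalizing acc with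
  | nil => simp
  | cons i rest ih =>
    have hi := hlst i (by simp)
    have hbuf : (s.drop (i * t)).take (p - i * t) ++ [s[p]]
        = (s.drop (i * t)).take (p + 1 - i * t) := buf_push s (i * t) p hi.1 hp
    have hlen : ((s.drop (i * t)).take (p + 1 - i * t)).length = p + 1 - i * t := by
      simp only [List.length_take, List.length_drop]
      omega
    simp only [List.map_cons, List.foldl_cons]
    rw [show segB_inner (l : Int) s[p] (d, acc) (segBuf s t p i)
        = (d, acc ++ [segBuf s t (p + 1) i]) from ?_]
    · rw [ih _ (fun j hj => hlst j (by simp [hj]))]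
      simp
    · simp only [segB_inner, segBuf, hbuf, hlen]
      rw [if_neg (by
        intro hc
        have : p + 1 - i * t = l := by exact_mod_cast hc
        omega)]

lemma segB_inv (s : List Char) (l t : Nat) (ht : 1 ≤ t) (hl : 1 ≤ l) (hln : l < s.length) :
    ∀ p, p ≤ s.length → ∃ c u, c ≤ u ∧
      (∀ i, i < u ↔ (i * t < p ∧ i * t < s.length - l + t)) ∧
      (∀ i, i < c ↔ i * t + l ≤ p) ∧
      (PySem.List.enumerate (s.take p) 0).foldl
          (segB_step (s.length : Int) (l : Int) (t : Int)) ([], [])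
        = ((List.range' 0 c).map (segDone s t l), (List.range' c (u - c)).map (segBuf s t p)) := by
  have ht0 : 0 < t := ht
  have hmul : ∀ a b : Nat, a < b → a * t < b * t := fun a b h => Nat.mul_lt_mul_of_pos_right h ht0
  have hmle : ∀ a b : Nat, a * t ≤ b * t → a ≤ b := by
    intro a b h
    by_contra hab
    exact absurd h (by simpa using hmul b a (by omega))
  intro p
  induction p with
  | zero =>
    intro _
    refine ⟨0, 0, le_rfl, ?_, ?_, ?_⟩
    · intro i; omega
    · intro i; omega
    · simp [PySem.List.enumerate_nil]
  | succ p ihp =>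
    intro hp1
    have hp : p < s.length := by omega
    obtain ⟨c, u, hcu, hu, hc, hfold⟩ := ihp (by omega)
    -- peel off the step for character p
    have htake : s.take (p + 1) = s.take p ++ [s[p]] := by
      rw [List.take_add_one, List.getElem?_eq_getElem hp]
      rfl
    have hlen_take : ((s.take p).length : Int) = (p : Int) := by
      simp only [List.length_take]
      omega
    have henum : PySem.List.enumerate (s.take (p + 1)) 0
        = PySem.List.enumerate (s.take p) 0 ++ [((p : Int), s[p])] := by
      rw [htake, PySem.List.enumerate_append, hlen_take]
      simp [PySem.List.enumerate_cons, PySem.List.enumerate_nil]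
    rw [henum, List.foldl_append, hfold, List.foldl_cons, List.foldl_nil]
    -- the open-a-window phase
    have hopen : ∃ u', c ≤ u' ∧
        (∀ i, i < u' ↔ (i * t ≤ p ∧ i * t < s.length - l + t)) ∧
        ((if PySem.Int.mod (p : Int) (t : Int) = 0 ∧ ((p : Int) = 0 ∨ (p : Int) - (t : Int) + (l : Int) < (s.length : Int))
          then ((List.range' c (u - c)).map (segBuf s t p)) ++ [((p : Int) + 1, ([] : List Char))]
          else ((List.range' c (u - c)).map (segBuf s t p)))
         = (List.range' c (u' - c)).map (segBuf s t p)) := by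
      by_cases hC : t ∣ p ∧ p + l < s.length + t
      · -- a window opens at p
        obtain ⟨j, hjj⟩ := hC.1
        have hjt : j * t = p := by rw [Nat.mul_comm]; exact hjj.symm
        have hplt : p < s.length - l + t := by omega
        have huj : u = j := by
          have h1 : ¬ j < u := fun hlt => by
            have := (hu j).mp hlt
            omega
          have h2 : ¬ u < j := fun hlt => by
            have h3 := hmul u j hlt
            have := (hu u).mpr ⟨by omega, by omega⟩
            omega
          omega
        refine ⟨u + 1, by omega, ?_, ?_⟩
        · intro i
          constructor
          · intro hi
            rcases Nat.lt_succ_iff_lt_or_eq.mp hi with hi' | hi'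
            · have := (hu i).mp hi'
              exact ⟨by omega, this.2⟩
            · subst hi'; rw [huj, hjt]; exact ⟨le_rfl, hplt⟩
          · intro ⟨hi1, _⟩
            have : i * t ≤ u * t := by rw [huj, hjt]; exact hi1
            have := hmle i u this
            omega
        · rw [if_pos ?_]
          · have hnew : ((p : Int) + 1, ([] : List Char)) = segBuf s t p u := by
              simp only [segBuf, huj, hjt]
              rw [Nat.sub_self]
              simp
            rw [hnew, show u + 1 - c = (u - c) + 1 by omega, List.range'_concat,
              List.map_append, show c + 1 * (u - c) = u by omega]
            simp
          · refine ⟨?_, Or.inr (by omega)⟩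
            rw [← hjt, PySem.Int.mod_natCast]
            simp [Nat.mul_mod_left]
      · -- no window opens at p
        refine ⟨u, hcu, ?_, ?_⟩
        · intro i
          constructor
          · intro hi
            have := (hu i).mp hi
            exact ⟨by omega, this.2⟩
          · intro ⟨hi1, hi2⟩
            rcases Nat.lt_or_ge (i * t) p with h | h
            · exact (hu i).mpr ⟨h, hi2⟩
            · exfalso
              have hip : i * t = p := by omega
              refine hC ⟨⟨i, ?_⟩, by omega⟩
              rw [Nat.mul_comm]
              omega
        · rw [if_neg ?_]
          intro ⟨hm, hor⟩
          rw [PySem.Int.mod_natCast] at hm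
          have hdvd : t ∣ p := Nat.dvd_of_mod_eq_zero (by exact_mod_cast hm)
          rcases hor with h0 | hlt
          · have hp0 : p = 0 := by exact_mod_cast h0
            exact hC ⟨hdvd, by omega⟩
          · exact hC ⟨hdvd, by omega⟩
    obtain ⟨u', hcu', hu', hopens⟩ := hopen
    -- the inner loop over the open windows
    simp only [segB_step]
    rw [hopens]
    by_cases hCC : l ≤ p + 1 ∧ t ∣ (p + 1 - l)
    · -- the oldest open window completes at p
      obtain ⟨i0, hii⟩ := hCC.2
      have hi0t : i0 * t + l = p + 1 := by
        rw [Nat.mul_comm t i0] at hii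
        omega
      have hci0 : c = i0 := by
        have h1 : ¬ i0 < c := fun hlt => by
          have := (hc i0).mp hlt
          omega
        have h2 : ¬ c < i0 := fun hlt => by
          have h3 := hmul c i0 hlt
          have := (hc c).mpr (by omega)
          omega
        omega
      have hct : c * t + l = p + 1 := by rw [hci0]; exact hi0t
      have hclt : c < u' := by
        refine (hu' c).mpr ⟨by omega, by omega⟩
      refine ⟨c + 1, u', by omega, ?_, ?_, ?_⟩
      · intro i
        rw [hu' i]
        omega
      · intro i
        constructor
        · intro hi
          rcases Nat.lt_succ_iff_lt_or_eq.mp hi with hi' | hi'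
          · have := (hc i).mp hi'
            omega
          · subst hi'
            omega
        · intro hi
          have : i * t ≤ c * t := by omega
          have := hmle i c this
          omega
      · rw [show u' - c = (u' - c - 1) + 1 by omega, List.range'_succ, List.map_cons,
            List.foldl_cons]
        have hhead : segB_inner (l : Int) s[p] ((List.range' 0 c).map (segDone s t l), [])
            (segBuf s t p c) = ((List.range' 0 (c + 1)).map (segDone s t l), []) := by
          have hbuf : (s.drop (c * t)).take (p - c * t) ++ [s[p]]
              = (s.drop (c * t)).take (p + 1 - c * t) := buf_push s (c * t) p (by omega) hp
          have hpl : p + 1 - c * t = l := by omega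
          have hlen : ((s.drop (c * t)).take l).length = l := by
            simp only [List.length_take, List.length_drop]
            omega
          simp only [segB_inner, segBuf, hbuf, hpl, hlen]
          rw [if_pos trivial, List.range'_concat, List.map_append,
            show 0 + 1 * c = c by omega]
          simp [segDone]
        rw [hhead]
        rw [inner_nodone s t l p hp _ _ _ ?_]
        · simp only [List.nil_append]
          rw [show u' - (c + 1) = u' - c - 1 by omega]
        · intro i hi
          rw [List.mem_range'] at hi
          obtain ⟨w, hw, hiw⟩ := hi
          have hiu : i < u' := by omega
          have h1 := (hu' i).mp hiu
          refine ⟨h1.1, ?_⟩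
          have h2 : (c + 1) * t ≤ i * t := Nat.mul_le_mul (by omega) (le_refl t)
          have h3 : (c + 1) * t = c * t + t := by ring
          omega
    · -- no window completes at p
      refine ⟨c, u', hcu', ?_, ?_, ?_⟩
      · intro i
        rw [hu' i]
        omega
      · intro i
        constructor
        · intro hi
          have := (hc i).mp hi
          omega
        · intro hi
          rcases Nat.lt_or_ge (i * t + l) (p + 1) with h | h
          · exact (hc i).mpr (by omega)
          · exfalso
            refine hCC ⟨by omega, ⟨i, ?_⟩⟩
            rw [Nat.mul_comm]
            omega
      · rw [inner_nodone s t l p hp _ _ _ ?_]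
        · simp
        · intro i hi
          rw [List.mem_range'] at hi
          obtain ⟨w, hw, hiw⟩ := hi
          have hiu : i < u' := by omega
          refine ⟨((hu' i).mp hiu).1, ?_⟩
          intro hcon
          refine hCC ⟨by omega, ⟨i, ?_⟩⟩
          rw [Nat.mul_comm]
          omega

-- the two sides meet: both equal the window list indexed by List.range u
lemma final_eq (sequence : String) (L ov : Int)
    (hL : 1 ≤ L) (hn : L < (sequence.toList.length : Int)) :
    segment_sequence sequence L ov = segment_sequence_alt sequence L ov := by
  have hguard : ¬ ((sequence.toList.length : Int) ≤ L) := by omega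
  set s := sequence.toList with hs
  set n := s.length with hnn
  set st := max 1 (L - ov) with hstdef
  have hst : 0 < st := by omega
  set l := L.toNat with hldef
  set t := st.toNat with htdef
  have hlL : (l : Int) = L := Int.toNat_of_nonneg (by omega)
  have htst : (t : Int) = st := Int.toNat_of_nonneg (by omega)
  have ht1 : 1 ≤ t := by omega
  have hl1 : 1 ≤ l := by omega
  have hln : l < n := by omega
  -- B side: run the invariant to the end of the string
  obtain ⟨c, u, hcu, hu, hc, hfold⟩ := segB_inv s l t ht1 hl1 hln n le_rfl
  rw [List.take_length] at hfold
  rw [hlL, htst] at hfold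
  -- characterize u against A's ceiling index
  set k := -(PySem.Int.floordiv (-((n : Int) - L)) st) with hkdef
  have hk := (PySem.Int.neg_floordiv_neg_eq_iff_of_pos (a := (n : Int) - L) (b := st)
      (q := k) hst).mp rfl
  have hk0 : 0 ≤ k := by nlinarith [hk.1, hk.2]
  set q := PySem.Int.floordiv ((n : Int) - 1) st with hqdef
  have hq := (PySem.Int.floordiv_eq_iff_of_pos (a := (n : Int) - 1) (b := st) (q := q) hst).mp rfl
  have hu1 : 1 ≤ u := by
    have := (hu 0).mpr ⟨by omega, by omega⟩
    omega
  set v := u - 1 with hvdef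
  have hvu : u = v + 1 := by omega
  have hvchar := (hu v).mp (by omega)
  have hvnot : ¬ (u * t < n ∧ u * t < n - l + t) := fun hcon => by
    have := (hu u).mpr hcon
    omega
  have hvt1 : ((v * t : Nat) : Int) = (v : Int) * st := by push_cast [htst]; ring
  have hvt2 : ((u * t : Nat) : Int) = ((v : Int) + 1) * st := by
    rw [hvu]; push_cast [htst]; ring
  have hIv1 : (v : Int) * st < (n : Int) := by
    rw [← hvt1]; exact_mod_cast hvchar.1
  have hIv2 : (v : Int) * st + L < (n : Int) + st := by
    have : v * t + l < n + t := by omega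
    have := (Int.ofNat_lt.mpr this)
    push_cast [htst, hlL] at this ⊢
    omega
  have hIvnot : ((v : Int) + 1) * st ≥ (n : Int) ∨ ((v : Int) + 1) * st + L ≥ (n : Int) + st := by
    rcases Nat.lt_or_ge (u * t) n with h1 | h1
    · right
      have h2 : ¬ (u * t < n - l + t) := fun h => hvnot ⟨h1, h⟩
      have h3 : n + t ≤ u * t + l := by omega
      have := (Int.ofNat_le.mpr h3)
      push_cast [htst, hlL, hvt2] at this ⊢
      omega
    · left
      have := (Int.ofNat_le.mpr h1)
      rw [hvt2] at this
      omega
  have hmulle : ∀ a b : Int, a ≤ b → a * st ≤ b * st :=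
    fun a b h => mul_le_mul_of_nonneg_right h (by omega)
  have hvq : (v : Int) ≤ q := by
    by_contra hcon
    have h1 := hmulle (q + 1) (v : Int) (by omega)
    have h2 : (q + 1) * st = q * st + st := by ring
    linarith [hq.2, hIv1]
  have hvk : (v : Int) ≤ k := by
    by_contra hcon
    have h1 := hmulle (k + 1) (v : Int) (by omega)
    have h2 : (k + 1) * st = k * st + st := by ring
    linarith [hk.2, hIv2]
  have hminv : min k q = (v : Int) := by
    rcases hIvnot with h | h
    · have hqv : q ≤ (v : Int) := by
        by_contra hcon
        have h1 := hmulle ((v : Int) + 1) q (by omega)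
        linarith [hq.1, h]
      omega
    · have hkv : k ≤ (v : Int) := by
        by_contra hcon
        have h1 := hmulle ((v : Int) + 1) k (by omega)
        have h2 : ((v : Int) + 1) * st = (v : Int) * st + st := by ring
        have h3 : (k - 1 + 1) * st = (k - 1) * st + st := by ring
        have h4 : k - 1 + 1 = k := by ring
        rw [← h4] at h1
        linarith [hk.1, h]
      omega
  -- A side: the loop computes the same window list
  have main := segA_loop_eq s L st k ((v : Int)) hL hst hn hk.1 hk.2 hminv.symm
    k.toNat 0 [] le_rfl hk0 (by omega)
  rw [zero_mul] at main
  have hrange : PySem.List.pyRange 0 ((v : Int) + 1) 1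
      = List.map (fun k : Nat => (k : Int)) (List.range u) := by
    have h1 : ((v : Int)) + 1 = ((u : Nat) : Int) := by omega
    rw [h1]
    exact PySem.List.pyRange_zero_natCast u
  -- the common value, elementwise
  have hentry : ∀ i : Nat, i < u →
      ((i : Int) * st + 1,
        String.ofList (PySem.List.slice s (some ((i : Int) * st)) (some ((i : Int) * st + L))))
      = (if i < c then segDone s t l i else ((((i * t : Nat) : Int)) + 1,
          String.ofList ((s.drop (i * t)).take (n - i * t)))) := by
    intro i hi
    have hslice : PySem.List.slice s (some ((i : Int) * st)) (some ((i : Int) * st + L))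
        = (s.drop (i * t)).take l := by
      have h0 : (0 : Int) ≤ (i : Int) * st := mul_nonneg (Int.natCast_nonneg i) (by omega)
      rw [PySem.List.slice_toNat s h0 (by omega)]
      have h1 : ((i : Int) * st).toNat = i * t := by
        rw [← htst]
        omega
      have h2 : ((i : Int) * st + L).toNat = i * t + l := by
        rw [← htst, ← hlL]
        omega
      rw [h1, h2, Nat.add_sub_cancel_left]
    have hfst : (i : Int) * st + 1 = (((i * t : Nat) : Int)) + 1 := by
      push_cast [htst]
      ring
    by_cases hic : i < c
    · rw [if_pos hic, hslice, segDone, hfst]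
    · rw [if_neg hic, hslice, hfst]
      have hover : n < i * t + l := by
        by_contra hcon
        exact hic ((hc i).mpr (by omega))
      have hit : i * t ≤ n := by
        have := ((hu i).mp hi).1
        omega
      have hdlen : ((s.drop (i * t)).length) = n - i * t := by
        rw [List.length_drop, ← hnn]
      rw [List.take_of_length_le (by omega), List.take_of_length_le (by omega)]
  -- assemble
  show segment_sequence sequence L ov = segment_sequence_alt sequence L ov
  unfold segment_sequence segment_sequence_alt
  simp only [← hs, ← hnn, ← hstdef, if_neg hguard]
  rw [← hnn] at main
  rw [main, hfold, hrange, List.map_map]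
  rw [List.nil_append]
  have hsplit : List.range' 0 c ++ List.range' c (u - c) = List.range u := by
    have h1 := List.range'_append (s := 0) (m := c) (n := u - c) (step := 1)
    rw [show (0 : Nat) + 1 * c = c by omega] at h1
    rw [h1, List.range_eq_range', show c + (u - c) = u by omega]
  rw [← hsplit, List.map_append]
  congr 1
  · apply List.map_congr_left
    intro i hi
    rw [List.mem_range'] at hi
    have hic : i < c := by omega
    have := hentry i (by omega)
    rw [if_pos hic] at this
    simpa using this
  · rw [List.map_map]
    apply List.map_congr_left
    intro i hi
    rw [List.mem_range'] at hi
    have hiu : i < u := by omega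
    have hic : ¬ i < c := by omega
    have := hentry i hiu
    rw [if_neg hic] at this
    simpa [segBuf] using this

-- ===== VERDICT (by name: the statement is the Claim_ definition above) =====
theorem segment_sequence_spec : Claim_equal_segment_sequence := by
  intro sequence L ov _hdom hpre
  unfold Spec_segment_sequence
  by_cases hguard : ((sequence.toList.length : Int) ≤ L)
  · unfold segment_sequence segment_sequence_alt
    simp only [if_pos hguard]
  · have hL : 1 ≤ L := hpre.resolve_left hguard
    exact final_eq sequence L ov hL (by omega)
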